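-- pv_equiv track=rewrite | github.com/SatoryKono/ChEMBL_dataAcquisition | library/pipeline_targets.py | _select_primary
-- ===== SOURCE A (Python) =====
-- from typing import Any, Callable, Dict, List, Mapping, MutableMapping, Sequence
--
-- def _select_primary(
--     entries: List[Dict[str, Any]], priority: Sequence[str]
-- ) -> Dict[str, Any] | None:
--     """Select the primary UniProt entry from a list of entries.
--
--     The selection is based on a priority list of species. If no entry matches
--     the priority list, the first entry in the sorted list is returned.
--
--     Parameters
--     ----------
--     entries:
--         A list of normalized UniProt entry dictionaries.
--     priority:
--         A sequence of species names in order of priority.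
--
--     Returns
--     -------
--     Dict[str, Any] | None
--         The selected primary entry, or None if the input list is empty.
--     """
--     if not entries:
--         return None
--     for sp in priority:
--         for entry in entries:
--             if entry.get("organism_name") == sp:
--                 return entry
--     return sorted(entries, key=lambda e: e.get("uniprot_id") or "")[0]
-- ===== SOURCE B (Python) =====
-- from typing import Any, Dict, List, Sequence
--
--
-- def _select_primary(
--     entries: List[Dict[str, Any]], priority: Sequence[str]
-- ) -> Dict[str, Any] | None:
--     """One-pass selection: track the entry with the best (smallest) species-priority
--     rank and, separately, the entry with the smallest uniprot_id key; both keep the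
--     first entry on ties (strict <), matching the nested-loop / stable-sort choice."""
--     if not entries:
--         return None
--     rank: Dict[Any, int] = {}
--     for i, sp in enumerate(priority):
--         if sp not in rank:
--             rank[sp] = i
--     inf = len(priority)
--     best_p = None
--     best_pr = inf
--     best_u = None
--     best_uk = None
--     for e in entries:
--         r = rank.get(e.get("organism_name"), inf)
--         if r < best_pr:
--             best_pr = r
--             best_p = e
--         k = e.get("uniprot_id") or ""
--         if best_uk is None or k < best_uk:
--             best_uk = k
--             best_u = e
--     return best_p if best_pr < inf else best_u
-- ===== Notes on version B (the rewrite author's own statement) =====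
-- stated objective: faster
-- what changed: Replaces A's priority-by-entries nested scan plus a full sort of the entries by a first-occurrence species->index map and one pass over the entries tracking two running minima (best priority rank and smallest uniprot_id key, first entry kept on ties).
import Mathlib
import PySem

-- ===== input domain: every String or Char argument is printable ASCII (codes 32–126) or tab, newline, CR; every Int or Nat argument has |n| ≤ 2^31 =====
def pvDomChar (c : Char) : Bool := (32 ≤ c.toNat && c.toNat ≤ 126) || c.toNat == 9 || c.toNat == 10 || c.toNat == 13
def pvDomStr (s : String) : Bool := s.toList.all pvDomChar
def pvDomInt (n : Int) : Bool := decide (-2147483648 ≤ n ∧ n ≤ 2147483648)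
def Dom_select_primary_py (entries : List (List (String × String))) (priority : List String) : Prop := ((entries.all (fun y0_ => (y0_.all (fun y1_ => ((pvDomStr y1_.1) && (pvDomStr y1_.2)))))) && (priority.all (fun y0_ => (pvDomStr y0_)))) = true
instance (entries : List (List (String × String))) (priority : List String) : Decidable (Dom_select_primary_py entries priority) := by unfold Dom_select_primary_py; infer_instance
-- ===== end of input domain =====

-- Re-implementation B replaces A's priority×entries nested scan and full stable sort by a
-- first-occurrence rank map plus a single pass tracking two running minima (objective: faster
-- single pass; same return value).

-- ===== PORT A =====
-- entry.get(k): first-match lookup in the association list (Python dict has unique keys)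
def pvAGet (e : List (String × String)) (k : String) : Option String :=
  PySem.Dict.get? (PySem.Dict.mk e) k

-- key = e.get("uniprot_id") or ""   ("" and missing both give "")
def pvAKey (e : List (String × String)) : String :=
  match pvAGet e "uniprot_id" with
  | some s => if s == "" then "" else s
  | none => ""

-- for sp in priority: for entry in entries: if entry.get("organism_name") == sp: return entry
def pvALoop (entries : List (List (String × String))) : List String → Option (List (String × String))
  | [] => none
  | sp :: rest =>
    match entries.find? (fun e => pvAGet e "organism_name" == some sp) with
    | some e => some e
    | none => pvALoop entries rest

def select_primary_py (entries : List (List (String × String))) (priority : List String) : Option (List (String × String)) :=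
  if entries = [] then none
  else
    match pvALoop entries priority with
    | some e => some e
    | none => PySem.List.pyGet? (PySem.List.sorted entries pvAKey false) 0

-- ===== PORT B =====
def pvBGet (e : List (String × String)) (k : String) : Option String :=
  PySem.Dict.get? (PySem.Dict.mk e) k

def pvBKey (e : List (String × String)) : String :=
  match pvBGet e "uniprot_id" with
  | some s => if s == "" then "" else s
  | none => ""

-- rank = {}; for i, sp in enumerate(priority): if sp not in rank: rank[sp] = i
def pvBRankMap (priority : List String) : PySem.Dict String Int :=
  (PySem.List.enumerate priority).foldl
    (fun d p => if d.contains p.2 then d else d.insert p.2 p.1) (PySem.Dict.mk [])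

-- r = rank.get(e.get("organism_name"), inf)
def pvBRankOf (rank : PySem.Dict String Int) (inf : Int) (e : List (String × String)) : Int :=
  match pvBGet e "organism_name" with
  | some o => rank.getD o inf
  | none => inf

-- if r < best_pr: best_pr, best_p = r, e
def pvBStepP (rank : PySem.Dict String Int) (inf : Int)
    (s : Option (List (String × String)) × Int) (e : List (String × String)) :
    Option (List (String × String)) × Int :=
  if pvBRankOf rank inf e < s.2 then (some e, pvBRankOf rank inf e) else s

-- if best_uk is None or k < best_uk: best_uk, best_u = k, e
def pvBStepU (s : Option (List (String × String)) × Option String) (e : List (String × String)) :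
    Option (List (String × String)) × Option String :=
  match s.2 with
  | none => (some e, some (pvBKey e))
  | some bk => if pvBKey e < bk then (some e, some (pvBKey e)) else s

def select_primary_py_alt (entries : List (List (String × String))) (priority : List String) : Option (List (String × String)) :=
  if entries = [] then none
  else
    let rank := pvBRankMap priority
    let inf : Int := (priority.length : Int)
    let st := entries.foldl
      (fun s e => (pvBStepP rank inf s.1 e, pvBStepU s.2 e))
      ((none, inf), (none, none))
    if st.1.2 < inf then st.1.1 else st.2.1

-- ===== PRECONDITION & SPEC =====
def Spec_select_primary_py (entries : List (List (String × String))) (priority : List String) (out : Option (List (String × String))) : Prop := out = select_primary_py_alt entries priority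
instance (entries : List (List (String × String))) (priority : List String) (out : Option (List (String × String))) : Decidable (Spec_select_primary_py entries priority out) := by unfold Spec_select_primary_py; infer_instance

-- ===== CLAIM (what is proved, stated in full; the proofs are below) =====
def Claim_equal_select_primary_py : Prop := ∀ (entries : List (List (String × String))) (priority : List String), Dom_select_primary_py entries priority → Spec_select_primary_py entries priority (select_primary_py entries priority)

-- ===== LEMMAS AND PROOFS =====

-- rank of an entry: index in priority of the first species its organism_name equals (length if none)
def pvNRank (ps : List String) (e : List (String × String)) : Nat :=
  match ps.findIdx? (fun sp => pvAGet e "organism_name" == some sp) with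
  | some i => i
  | none => ps.length

-- running first-minimum fold (strict <, first on tie)
def pvFold {α κ : Type} [LinearOrder κ] (key : α → κ) (a : α) (t : List α) : α :=
  t.foldl (fun m y => if key y < key m then y else m) a

theorem pvAGet_eq_pvBGet : pvAGet = pvBGet := rfl

theorem pvAKey_eq_pvBKey : pvAKey = pvBKey := rfl

theorem pv_min?_go {α κ : Type} [LinearOrder κ] (key : α → κ) :
    ∀ (t : List α) (m : α),
      t.foldl (fun acc x => match acc with
        | none => some x
        | some m => if key x < key m then some x else some m) (some m)
      = some (pvFold key m t) := by
  intro t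
  induction t with
  | nil => intro m; rfl
  | cons x t ih =>
    intro m
    simp only [List.foldl_cons]
    by_cases h : key x < key m <;> simp [h, ih, pvFold]

theorem pv_min?_cons {α κ : Type} [LinearOrder κ] (key : α → κ) (x : α) (t : List α) :
    PySem.List.min? (x :: t) key = some (pvFold key x t) := by
  have h := pv_min?_go key t x
  simpa [PySem.List.min?] using h

theorem pvFold_le_start {α κ : Type} [LinearOrder κ] (key : α → κ) (t : List α) (a : α) :
    key (pvFold key a t) ≤ key a := by
  induction t generalizing a with
  | nil => simp [pvFold]
  | cons y t ih =>
    simp only [pvFold, List.foldl_cons]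
    by_cases h : key y < key a
    · simpa [h, pvFold] using le_trans (ih y) (le_of_lt h)
    · simpa [h, pvFold] using ih a

theorem pvFold_keep {α κ : Type} [LinearOrder κ] (key : α → κ) (t : List α) (a : α)
    (h : ∀ y ∈ t, ¬ key y < key a) : pvFold key a t = a := by
  induction t generalizing a with
  | nil => rfl
  | cons y t ih =>
    simp only [pvFold, List.foldl_cons]
    rw [if_neg (h y (by simp))]
    exact ih a (fun z hz => h z (by simp [hz]))

theorem pvFold_first {α κ : Type} [LinearOrder κ] (key : α → κ) (e : α) (bs : List α)
    (hbs : ∀ b ∈ bs, key e ≤ key b) :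
    ∀ (as_ : List α) (a : α), key e < key a → (∀ x ∈ as_, key e < key x) →
      pvFold key a (as_ ++ e :: bs) = e := by
  intro as_
  induction as_ with
  | nil =>
    intro a ha _
    simp only [pvFold, List.nil_append, List.foldl_cons]
    rw [if_pos ha]
    exact pvFold_keep key bs e (fun b hb => not_lt.mpr (hbs b hb))
  | cons x as ih =>
    intro a ha has
    simp only [pvFold, List.cons_append, List.foldl_cons]
    by_cases h : key x < key a
    · rw [if_pos h]
      exact ih x (has x (by simp)) (fun z hz => has z (by simp [hz]))
    · rw [if_neg h]
      exact ih a ha (fun z hz => has z (by simp [hz]))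

theorem pv_min?_first {α κ : Type} [LinearOrder κ] (key : α → κ) (e : α) (as_ bs : List α)
    (has : ∀ x ∈ as_, key e < key x) (hbs : ∀ b ∈ bs, key e ≤ key b) :
    PySem.List.min? (as_ ++ e :: bs) key = some e := by
  cases as_ with
  | nil =>
    rw [List.nil_append, pv_min?_cons]
    rw [pvFold_keep key bs e (fun b hb => not_lt.mpr (hbs b hb))]
  | cons a as =>
    rw [List.cons_append, pv_min?_cons]
    rw [pvFold_first key e bs hbs as a (has a (by simp)) (fun x hx => has x (by simp [hx]))]

theorem pvFold_shift {α : Type} (key key' : α → Nat) :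
    ∀ (t : List α) (a : α), key' a = key a + 1 → (∀ x ∈ t, key' x = key x + 1) →
      pvFold key' a t = pvFold key a t := by
  intro t
  induction t with
  | nil => intro a _ _; rfl
  | cons y t ih =>
    intro a ha ht
    have hy := ht y (by simp)
    simp only [pvFold, List.foldl_cons, hy, ha]
    by_cases h : key y < key a
    · rw [if_pos (by omega), if_pos h]
      exact ih y hy (fun z hz => ht z (by simp [hz]))
    · rw [if_neg (by omega), if_neg h]
      exact ih a ha (fun z hz => ht z (by simp [hz]))

theorem pv_min?_shift {α : Type} (key key' : α → Nat) (xs : List α)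
    (ht : ∀ x ∈ xs, key' x = key x + 1) :
    PySem.List.min? xs key' = PySem.List.min? xs key := by
  cases xs with
  | nil => rfl
  | cons x t =>
    rw [pv_min?_cons, pv_min?_cons,
      pvFold_shift key key' t x (ht x (by simp)) (fun z hz => ht z (by simp [hz]))]

theorem pvFold_cast {α : Type} (key : α → Nat) :
    ∀ (t : List α) (a : α), pvFold (fun x => ((key x : Nat) : Int)) a t = pvFold key a t := by
  intro t
  induction t with
  | nil => intro a; rfl
  | cons y t ih =>
    intro a
    simp only [pvFold, List.foldl_cons]
    by_cases h : key y < key a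
    · rw [if_pos (by exact_mod_cast h), if_pos h]; exact ih y
    · rw [if_neg (by exact_mod_cast h), if_neg h]; exact ih a

theorem pv_min?_cast {α : Type} (key : α → Nat) (xs : List α) :
    PySem.List.min? xs (fun x => ((key x : Nat) : Int)) = PySem.List.min? xs key := by
  cases xs with
  | nil => rfl
  | cons x t => rw [pv_min?_cons, pv_min?_cons, pvFold_cast key t x]

theorem pvFold_tie {α κ : Type} [LinearOrder κ] (key : α → κ) :
    ∀ (t : List α) (x y : α), key x = key y →
      pvFold key x t = pvFold key y t ∨ (pvFold key x t = x ∧ pvFold key y t = y) := by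
  intro t
  induction t with
  | nil => intro x y _; exact Or.inr ⟨rfl, rfl⟩
  | cons z t ih =>
    intro x y h
    simp only [pvFold, List.foldl_cons]
    by_cases hz : key z < key x
    · rw [if_pos hz, if_pos (h ▸ hz)]
      exact Or.inl rfl
    · rw [if_neg hz, if_neg (h ▸ hz)]
      exact ih x y h

-- A's priority loop picks the first entry of minimal rank (when some rank is finite)
theorem pvALoop_eq (entries : List (List (String × String))) :
    ∀ ps : List String,
      pvALoop entries ps =
        match PySem.List.min? entries (pvNRank ps) with
        | none => none
        | some m => if pvNRank ps m < ps.length then some m else none := by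
  intro ps
  induction ps with
  | nil =>
    simp only [pvALoop]
    cases h : PySem.List.min? entries (pvNRank []) with
    | none => rfl
    | some m => simp [pvNRank]
  | cons sp rest ih =>
    simp only [pvALoop]
    cases hf : entries.find? (fun e => pvAGet e "organism_name" == some sp) with
    | some e =>
      rw [List.find?_eq_some_iff_append] at hf
      obtain ⟨hpe, as_, bs, hsplit, hprev⟩ := hf
      have hke : pvNRank (sp :: rest) e = 0 := by
        simp [pvNRank, List.findIdx?_cons, hpe]
      have hprev' : ∀ a ∈ as_, pvNRank (sp :: rest) e < pvNRank (sp :: rest) a := by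
        intro a ha
        have hpa : (pvAGet a "organism_name" == some sp) = false := by
          simpa using hprev a ha
        rw [hke]
        unfold pvNRank
        rw [List.findIdx?_cons, if_neg (by simp [hpa])]
        cases h2 : rest.findIdx? (fun sp' => pvAGet a "organism_name" == some sp') <;> simp
      have hmin := pv_min?_first (pvNRank (sp :: rest)) e as_ bs hprev'
        (fun b _ => by rw [hke]; exact Nat.zero_le _)
      rw [hsplit, hmin]
      show some e = if pvNRank (sp :: rest) e < (sp :: rest).length then some e else none
      rw [hke]
      simp
    | none =>
      rw [List.find?_eq_none] at hf
      have hshift : ∀ a ∈ entries, pvNRank (sp :: rest) a = pvNRank rest a + 1 := by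
        intro a ha
        have hpa : ¬ (pvAGet a "organism_name" == some sp) = true := hf a ha
        unfold pvNRank
        rw [List.findIdx?_cons, if_neg (by simpa using hpa)]
        cases h2 : rest.findIdx? (fun sp' => pvAGet a "organism_name" == some sp') <;> simp
      have hmin := pv_min?_shift (pvNRank rest) (pvNRank (sp :: rest)) entries hshift
      show pvALoop entries rest =
        (match PySem.List.min? entries (pvNRank (sp :: rest)) with
          | none => none
          | some m => if pvNRank (sp :: rest) m < (sp :: rest).length then some m else none)
      rw [ih, hmin]
      cases hm : PySem.List.min? entries (pvNRank rest) with
      | none => rfl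
      | some m =>
        have hmem := PySem.List.min?_mem hm
        have hs := hshift m hmem
        simp only [hs, List.length_cons]
        by_cases hlt : pvNRank rest m < rest.length
        · rw [if_pos hlt, if_pos (by omega)]
        · rw [if_neg hlt, if_neg (by omega)]

-- head of the stable sort = first minimum
theorem pvInsert_fold_head {α κ : Type} [LinearOrder κ] (key : α → κ) :
    ∀ (xs : List α) (acc : List α),
      (∀ m, acc.head? = some m → ∀ y ∈ acc, key m ≤ key y) →
      (xs.foldl (fun acc x => PySem.List.insertBy (fun a b => decide (key a < key b)) x acc) acc).head?
        = xs.foldl (fun o x => match o with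
            | none => some x
            | some m => if key x < key m then some x else some m) acc.head? := by
  intro xs
  induction xs with
  | nil => intro acc _; rfl
  | cons x xs ih =>
    intro acc hinv
    simp only [List.foldl_cons]
    cases acc with
    | nil =>
      have h1 : PySem.List.insertBy (fun a b => decide (key a < key b)) x [] = [x] := rfl
      rw [h1, ih [x] (by intro m hm y hy; simp at hm hy; subst hm; subst hy; exact le_refl _)]
      rfl
    | cons m t =>
      have hstep : (PySem.List.insertBy (fun a b => decide (key a < key b)) x (m :: t)).head?
          = if key x < key m then some x else some m := by
        simp only [PySem.List.insertBy]
        by_cases h : key x < key m <;> simp [h]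
      have hinv' : ∀ m', (PySem.List.insertBy (fun a b => decide (key a < key b)) x (m :: t)).head? = some m' →
          ∀ y ∈ PySem.List.insertBy (fun a b => decide (key a < key b)) x (m :: t), key m' ≤ key y := by
        intro m' hm' y hy
        rw [hstep] at hm'
        rw [PySem.List.mem_insertBy] at hy
        have hminv := hinv m rfl
        by_cases h : key x < key m
        · rw [if_pos h] at hm'
          cases hm'
          rcases hy with h1 | h2
          · exact le_of_eq (by rw [h1])
          · exact le_trans (le_of_lt h) (hminv y h2)
        · rw [if_neg h] at hm'
          cases hm'
          rcases hy with h1 | h2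
          · rw [h1]; exact not_lt.mp h
          · exact hminv y h2
      rw [ih _ hinv', hstep]
      show _ = List.foldl _ (if key x < key m then some x else some m) xs
      by_cases h : key x < key m <;> simp [h]

theorem pv_sorted_head? {α κ : Type} [LinearOrder κ] (xs : List α) (key : α → κ) :
    (PySem.List.sorted xs key false).head? = PySem.List.min? xs key := by
  rw [PySem.List.sorted_eq_foldl_insertBy]
  have h := pvInsert_fold_head key xs [] (by intro m hm; simp at hm)
  rw [h]
  rfl

theorem pvP_some (rank : PySem.Dict String Int) (inf : Int) :
    ∀ (t : List (List (String × String))) (a : List (String × String)),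
      t.foldl (pvBStepP rank inf) (some a, pvBRankOf rank inf a)
        = (some (pvFold (pvBRankOf rank inf) a t), pvBRankOf rank inf (pvFold (pvBRankOf rank inf) a t)) := by
  intro t
  induction t with
  | nil => intro a; rfl
  | cons e t ih =>
    intro a
    simp only [List.foldl_cons, pvBStepP, pvFold]
    by_cases h : pvBRankOf rank inf e < pvBRankOf rank inf a
    · rw [if_pos h, if_pos h]
      exact ih e
    · rw [if_neg h, if_neg h]
      exact ih a

theorem pvP_none (rank : PySem.Dict String Int) (inf : Int) (xs : List (List (String × String)))
    (hle : ∀ x ∈ xs, pvBRankOf rank inf x ≤ inf) :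
    xs.foldl (pvBStepP rank inf) (none, inf)
      = match PySem.List.min? xs (pvBRankOf rank inf) with
        | none => (none, inf)
        | some m => if pvBRankOf rank inf m < inf then (some m, pvBRankOf rank inf m) else (none, inf) := by
  cases xs with
  | nil => rfl
  | cons x t =>
    have hle' : ∀ y ∈ t, pvBRankOf rank inf y ≤ inf := fun y hy => hle y (by simp [hy])
    rw [pv_min?_cons]
    simp only [List.foldl_cons, pvBStepP]
    by_cases h : pvBRankOf rank inf x < inf
    · rw [if_pos h]
      rw [pvP_some rank inf t x]
      have hM : pvBRankOf rank inf (pvFold (pvBRankOf rank inf) x t) < inf :=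
        lt_of_le_of_lt (pvFold_le_start (pvBRankOf rank inf) t x) h
      rw [if_pos hM]
    · rw [if_neg h]
      have hx : pvBRankOf rank inf x = inf := le_antisymm (hle x (by simp)) (not_lt.mp h)
      have ihres := pvP_none rank inf t hle'
      rw [ihres]
      cases t with
      | nil => simp [pvFold, PySem.List.min?, h]
      | cons y t' =>
        rw [pv_min?_cons]
        by_cases hy : pvBRankOf rank inf y < pvBRankOf rank inf x
        · have : pvFold (pvBRankOf rank inf) x (y :: t') = pvFold (pvBRankOf rank inf) y t' := by
            simp only [pvFold, List.foldl_cons]; rw [if_pos hy]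
          rw [this]
        · have hy3 : pvBRankOf rank inf y ≤ inf := hle y (by simp)
          have hxy : pvBRankOf rank inf x = pvBRankOf rank inf y := by omega
          have hfold : pvFold (pvBRankOf rank inf) x (y :: t') = pvFold (pvBRankOf rank inf) x t' := by
            simp only [pvFold, List.foldl_cons]; rw [if_neg hy]
          rw [hfold]
          rcases pvFold_tie (pvBRankOf rank inf) t' x y hxy with heq | ⟨h1, h2⟩
          · rw [heq]
          · rw [h1, h2]
            have hyinf : pvBRankOf rank inf y = inf := by rw [← hxy, hx]
            simp [hyinf, hx]

theorem pvU_some :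
    ∀ (t : List (List (String × String))) (m : List (String × String)),
      t.foldl pvBStepU (some m, some (pvBKey m))
        = (some (pvFold pvBKey m t), some (pvBKey (pvFold pvBKey m t))) := by
  intro t
  induction t with
  | nil => intro m; rfl
  | cons e t ih =>
    intro m
    simp only [List.foldl_cons, pvBStepU, pvFold]
    by_cases h : pvBKey e < pvBKey m
    · rw [if_pos h, if_pos h]
      exact ih e
    · rw [if_neg h, if_neg h]
      exact ih m

theorem pvU_none (xs : List (List (String × String))) :
    xs.foldl pvBStepU (none, none)
      = match PySem.List.min? xs pvBKey with
        | none => (none, none)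
        | some m => (some m, some (pvBKey m)) := by
  cases xs with
  | nil => rfl
  | cons x t =>
    rw [pv_min?_cons]
    simp only [List.foldl_cons, pvBStepU]
    exact pvU_some t x

theorem pvRank_go :
    ∀ (ps : List String) (n : Int) (d : PySem.Dict String Int) (s : String),
      ((PySem.List.enumerate ps n).foldl
        (fun d p => if d.contains p.2 then d else d.insert p.2 p.1) d).get? s
      = match d.get? s with
        | some v => some v
        | none => (ps.findIdx? (· == s)).map (fun i => n + (i : Int)) := by
  intro ps
  induction ps with
  | nil =>
    intro n d s
    cases h : d.get? s <;> simp [PySem.List.enumerate, h]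
  | cons x ps ih =>
    intro n d s
    have henum : PySem.List.enumerate (x :: ps) n = (n, x) :: PySem.List.enumerate ps (n + 1) := rfl
    rw [henum]
    simp only [List.foldl_cons]
    rw [ih (n + 1) (if d.contains x then d else d.insert x n) s]
    by_cases hxs : x = s
    · subst hxs
      by_cases hc : d.contains x
      · rw [if_pos hc]
        have hs : (d.get? x).isSome := by rw [← PySem.Dict.contains_eq_isSome_get?]; exact hc
        obtain ⟨v, hv⟩ := Option.isSome_iff_exists.mp hs
        simp [hv]
      · rw [if_neg hc]
        have hnone : d.get? x = none := by
          cases hg : d.get? x with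
          | none => rfl
          | some v =>
            exact absurd (by rw [PySem.Dict.contains_eq_isSome_get?, hg]; rfl) hc
        rw [hnone, PySem.Dict.get?_insert_self]
        simp [List.findIdx?_cons]
    · have hget : (if d.contains x then d else d.insert x n).get? s = d.get? s := by
        by_cases hc : d.contains x
        · rw [if_pos hc]
        · rw [if_neg hc, PySem.Dict.get?_insert_of_ne d n (Ne.symm hxs)]
      rw [hget]
      cases hg : d.get? s with
      | some v => rfl
      | none =>
        rw [List.findIdx?_cons, if_neg (by simp [hxs])]
        cases hidx : ps.findIdx? (· == s) with
        | none => rfl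
        | some i => simp; omega

theorem pvRankMap_get? (ps : List String) (s : String) :
    (pvBRankMap ps).get? s = (ps.findIdx? (· == s)).map (fun i => (i : Int)) := by
  have h := pvRank_go ps 0 (PySem.Dict.mk []) s
  unfold pvBRankMap
  rw [h]
  have hemp : (PySem.Dict.mk ([] : List (String × Int))).get? s = none := rfl
  rw [hemp]
  cases hidx : ps.findIdx? (· == s) <;> simp

theorem pvRankOf_eq (ps : List String) (e : List (String × String)) :
    pvBRankOf (pvBRankMap ps) (ps.length : Int) e = ((pvNRank ps e : Nat) : Int) := by
  unfold pvBRankOf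
  cases hg : pvBGet e "organism_name" with
  | none =>
    unfold pvNRank
    have hidx : ps.findIdx? (fun sp => pvAGet e "organism_name" == some sp) = none := by
      rw [List.findIdx?_eq_none_iff]
      intro sp _
      rw [pvAGet_eq_pvBGet, hg]
      rfl
    rw [hidx]
  | some o =>
    have hpred : (fun sp => pvAGet e "organism_name" == some sp) = (fun sp => sp == o) := by
      funext sp
      rw [pvAGet_eq_pvBGet, hg]
      by_cases h : sp = o
      · simp [h]
      · have h2 : o ≠ sp := fun hh => h hh.symm
        simp [h, h2]
    unfold pvNRank
    rw [hpred]
    show ((pvBRankMap ps).get? o).getD _ = _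
    rw [pvRankMap_get? ps o]
    cases hidx : ps.findIdx? (· == o) <;> simp

theorem pvNRank_le (ps : List String) (e : List (String × String)) :
    pvNRank ps e ≤ ps.length := by
  unfold pvNRank
  cases h : ps.findIdx? (fun sp => pvAGet e "organism_name" == some sp) with
  | none => exact le_refl _
  | some i =>
    exact le_of_lt (List.findIdx?_eq_some_iff_findIdx_eq.mp h).1

theorem pv_pyGet?_zero {α : Type} (s : α) (ss : List α) :
    PySem.List.pyGet? (s :: ss) 0 = some s := by
  simp [PySem.List.pyGet?, PySem.List.pyIdx?]

-- ===== VERDICT (by name: the statement is the Claim_ definition above) =====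
theorem select_primary_py_spec : Claim_equal_select_primary_py := by
  intro entries priority _
  unfold Spec_select_primary_py
  simp only [select_primary_py, select_primary_py_alt]
  by_cases hnil : entries = []
  · rw [if_pos hnil, if_pos hnil]
  · rw [if_neg hnil, if_neg hnil]
    rw [PySem.List.foldl_prod_mk (f := pvBStepP (pvBRankMap priority) (priority.length : Int))
      (g := pvBStepU)]
    have hrf : pvBRankOf (pvBRankMap priority) (priority.length : Int)
        = fun e => ((pvNRank priority e : Nat) : Int) := funext (pvRankOf_eq priority)
    have hle : ∀ x ∈ entries,
        pvBRankOf (pvBRankMap priority) (priority.length : Int) x ≤ (priority.length : Int) := by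
      intro x _
      rw [hrf]
      show ((pvNRank priority x : Nat) : Int) ≤ ((priority.length : Nat) : Int)
      exact_mod_cast pvNRank_le priority x
    rw [pvP_none _ _ entries hle, pvU_none entries]
    rw [hrf, pv_min?_cast (pvNRank priority) entries]
    rw [pvALoop_eq entries priority]
    cases hm : PySem.List.min? entries (pvNRank priority) with
    | none => exact absurd ((PySem.List.min?_eq_none_iff entries _).mp hm) hnil
    | some m =>
      dsimp only
      by_cases hlt : pvNRank priority m < priority.length
      · have hlt' : ((pvNRank priority m : Nat) : Int) < ((priority.length : Nat) : Int) := by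
          exact_mod_cast hlt
        simp [hlt, hlt']
      · have hlt' : ¬ ((pvNRank priority m : Nat) : Int) < ((priority.length : Nat) : Int) := by
          exact_mod_cast hlt
        simp only [if_neg hlt, if_neg hlt', lt_irrefl, if_false]
        have hhead := pv_sorted_head? entries pvBKey
        rw [pvAKey_eq_pvBKey]
        cases hs : PySem.List.sorted entries pvBKey false with
        | nil => exact absurd ((PySem.List.sorted_eq_nil_iff entries pvBKey false).mp hs) hnil
        | cons s ss =>
          rw [hs] at hhead
          rw [pv_pyGet?_zero, ← hhead]
          rfl
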